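-- pv_equiv track=rewrite | github.com/khanh585/server-barcode | utils/read_code.py | crop_white
-- ===== SOURCE A (Python) =====
-- def crop_white(line):
--     line_f = list(line)
--     line = list(line)
--
--     head = 0
--     while len(line_f) != 0:
--         if line_f[0] != 255:
--             break
--         line_f.pop(0)
--         line.pop(0)
--         head += 1
--     tail = 0
--     while len(line_f) != 0:
--         if line_f[-1] != 255:
--             break
--         line_f.pop()
--         line.pop()
--         tail += 1
--
--     return line, head, tail
--
--
--
--     return thresh2
-- ===== SOURCE B (Python) =====
-- def crop_white(line):
--     idx = [i for i, x in enumerate(line) if x != 255]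
--     if not idx:
--         return [], len(list(line)), 0
--     head = idx[0]
--     tail = len(line) - 1 - idx[-1]
--     return list(line)[head:len(line) - tail], head, tail
-- ===== Notes on version B (the rewrite author's own statement) =====
-- stated objective: alternative
-- what changed: A shrinks the list destructively from both ends with two while-loops popping 255s; B does one enumerate pass collecting the indices of non-255 values, then computes head/tail from the first and last index and returns one slice.
import Mathlib
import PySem

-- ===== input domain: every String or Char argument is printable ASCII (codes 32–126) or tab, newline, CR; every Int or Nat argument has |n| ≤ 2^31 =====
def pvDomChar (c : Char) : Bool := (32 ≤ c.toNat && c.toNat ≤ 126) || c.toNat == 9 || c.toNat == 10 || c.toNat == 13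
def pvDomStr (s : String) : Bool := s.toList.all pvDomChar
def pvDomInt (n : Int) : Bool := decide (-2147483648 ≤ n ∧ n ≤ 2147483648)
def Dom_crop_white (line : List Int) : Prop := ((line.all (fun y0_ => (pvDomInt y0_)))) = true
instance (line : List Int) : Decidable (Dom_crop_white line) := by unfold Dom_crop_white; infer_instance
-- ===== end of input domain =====

-- B replaces A's two destructive end-shrinking while-loops by one index-building pass plus O(1) boundary arithmetic and a slice (objective: alternative decomposition; return value only — A also mutates its local copies, not the caller's list).

-- ===== PORT A =====
-- first while-loop: pop the front of both copies while it is 255, counting head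
def aHeadLoop : List Int → List Int → Int → List Int × List Int × Int
  | [], l, h => ([], l, h)
  | x :: xs, l, h =>
    if x ≠ 255 then (x :: xs, l, h)
    else aHeadLoop xs l.tail (h + 1)

-- second while-loop: pop the back (line_f[-1]) of both copies while it is 255, counting tail
def aTailLoop (lf l : List Int) (t : Int) : List Int × List Int × Int :=
  if h : lf = [] then (lf, l, t)
  else if lf.getLast h ≠ 255 then (lf, l, t)
  else aTailLoop lf.dropLast l.dropLast (t + 1)
termination_by lf.length
decreasing_by
  simpa [List.length_dropLast] using Nat.sub_lt (List.length_pos_iff.mpr h) one_pos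

def crop_white (line : List Int) : List Int × Int × Int :=
  let s1 := aHeadLoop line line 0      -- line_f = list(line); line = list(line); head = 0
  let s2 := aTailLoop s1.1 s1.2.1 0    -- tail = 0
  (s2.2.1, s1.2.2, s2.2.2)             -- return line, head, tail

-- ===== PORT B =====
def crop_white_alt (line : List Int) : List Int × Int × Int :=
  let idx := ((PySem.List.enumerate line).filter (fun p => p.2 ≠ 255)).map (fun p => p.1)
  if idx.isEmpty then ([], (line.length : Int), 0)
  else
    let head := idx.headD 0                                 -- idx[0]; idx is nonempty here
    let tail := (line.length : Int) - 1 - idx.getLastD 0    -- idx[-1]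
    (PySem.List.slice line (some head) (some ((line.length : Int) - tail)), head, tail)

-- ===== PRECONDITION & SPEC =====
def Spec_crop_white (line : List Int) (out : List Int × Int × Int) : Prop := out = crop_white_alt line
instance (line : List Int) (out : List Int × Int × Int) : Decidable (Spec_crop_white line out) := by unfold Spec_crop_white; infer_instance

-- ===== CLAIM (what is proved, stated in full; the proofs are below) =====
def Claim_equal_crop_white : Prop := ∀ (line : List Int), Dom_crop_white line → Spec_crop_white line (crop_white line)

-- ===== LEMMAS AND PROOFS =====

theorem aHeadLoop_eq (l : List Int) (h : Int) :
    aHeadLoop l l h =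
      (l.dropWhile (· == 255), l.dropWhile (· == 255),
        h + ((l.takeWhile (· == 255)).length : Int)) := by
  induction l generalizing h with
  | nil => simp [aHeadLoop]
  | cons x xs ih =>
    by_cases hx : x = 255
    · subst hx
      simp [aHeadLoop, ih]
      ring
    · simp [aHeadLoop, hx]

theorem aTailLoop_eq (l : List Int) (t : Int) :
    aTailLoop l l t =
      ((l.reverse.dropWhile (· == 255)).reverse,
        (l.reverse.dropWhile (· == 255)).reverse,
        t + ((l.reverse.takeWhile (· == 255)).length : Int)) := by
  induction l using List.reverseRecOn generalizing t with
  | nil => rw [aTailLoop]; simp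
  | append_singleton l a ih =>
    rw [aTailLoop]
    by_cases ha : a = 255
    · subst ha
      simp [ih]
      ring
    · simp [ha]

-- idx with an arbitrary enumerate start, as in B's port
def idxAux (l : List Int) (s : Int) : List Int :=
  ((PySem.List.enumerate l s).filter (fun p => p.2 ≠ 255)).map (fun p => p.1)

theorem idxAux_cons (x : Int) (xs : List Int) (s : Int) :
    idxAux (x :: xs) s =
      if x = 255 then idxAux xs (s + 1) else s :: idxAux xs (s + 1) := by
  by_cases hx : x = 255 <;>
    simp [idxAux, PySem.List.enumerate_cons, hx]

theorem idxAux_append_singleton (l : List Int) (a : Int) (s : Int) :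
    idxAux (l ++ [a]) s =
      idxAux l s ++ (if a = 255 then [] else [s + (l.length : Int)]) := by
  by_cases ha : a = 255 <;>
    simp [idxAux, PySem.List.enumerate_append, PySem.List.enumerate_cons,
      PySem.List.enumerate_nil, ha]

theorem idxAux_nil_iff (l : List Int) (s : Int) :
    idxAux l s = [] ↔ l.all (· == 255) := by
  induction l generalizing s with
  | nil => simp [idxAux]
  | cons x xs ih =>
    rw [idxAux_cons]
    by_cases hx : x = 255 <;> simp [hx, ih]

theorem idxAux_headD (l : List Int) (s : Int) (h : idxAux l s ≠ []) :
    (idxAux l s).headD 0 = s + ((l.takeWhile (· == 255)).length : Int) := by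
  induction l generalizing s with
  | nil => simp [idxAux] at h
  | cons x xs ih =>
    rw [idxAux_cons] at h ⊢
    by_cases hx : x = 255
    · simp only [hx, if_true] at h ⊢
      rw [ih _ h]
      simp
      ring
    · simp [hx]

theorem idxAux_getLastD (l : List Int) (s : Int) (h : idxAux l s ≠ []) :
    (idxAux l s).getLastD 0 =
      s + (l.length : Int) - 1 - ((l.reverse.takeWhile (· == 255)).length : Int) := by
  induction l using List.reverseRecOn generalizing s with
  | nil => simp [idxAux] at h
  | append_singleton l a ih =>
    rw [idxAux_append_singleton] at h ⊢
    by_cases ha : a = 255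
    · rw [ha, if_pos rfl, List.append_nil] at h ⊢
      rw [ih s h]
      simp
      ring
    · simp [ha]
      ring

theorem takeWhile_append_of_exists {α : Type} (p : α → Bool) (u v : List α)
    (h : ∃ y ∈ u, p y = false) :
    (u ++ v).takeWhile p = u.takeWhile p := by
  induction u with
  | nil => simp at h
  | cons x xs ih =>
    by_cases hx : p x
    · simp only [List.cons_append, List.takeWhile_cons, hx]
      rcases h with ⟨y, hy, hpy⟩
      rcases List.mem_cons.mp hy with hy1 | hy1
      · subst hy1; simp [hx] at hpy
      · rw [ih ⟨y, hy1, hpy⟩]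
    · simp [hx]

theorem dropWhile_eq_drop {α : Type} (p : α → Bool) (l : List α) :
    l.dropWhile p = l.drop (l.takeWhile p).length := by
  induction l with
  | nil => simp
  | cons x xs ih => by_cases hx : p x <;> simp [List.dropWhile_cons, hx, ih]

-- crop_white_alt, re-expressed through idxAux (definitional)
theorem crop_white_alt_eq (line : List Int) : crop_white_alt line =
    (if (idxAux line 0).isEmpty then ([], (line.length : Int), 0)
     else (PySem.List.slice line (some ((idxAux line 0).headD 0))
             (some ((line.length : Int) - ((line.length : Int) - 1 - (idxAux line 0).getLastD 0))),
           (idxAux line 0).headD 0,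
           (line.length : Int) - 1 - (idxAux line 0).getLastD 0)) := rfl

theorem crop_white_main (line : List Int) : crop_white line = crop_white_alt line := by
  have hA : crop_white line =
      (((line.dropWhile (· == 255)).reverse.dropWhile (· == 255)).reverse,
       ((line.takeWhile (· == 255)).length : Int),
       (((line.dropWhile (· == 255)).reverse.takeWhile (· == 255)).length : Int)) := by
    unfold crop_white
    rw [aHeadLoop_eq]
    simp only
    rw [aTailLoop_eq]
    simp
  rw [hA, crop_white_alt_eq]
  by_cases hm : idxAux line 0 = []
  · have hall : line.all (· == 255) := (idxAux_nil_iff line 0).mp hm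
    have hdw : line.dropWhile (· == 255) = [] :=
      List.dropWhile_eq_nil_iff.mpr (by simpa using hall)
    have htw : line.takeWhile (· == 255) = line := by
      have h0 := List.takeWhile_append_dropWhile (p := (· == 255)) (l := line)
      rw [hdw, List.append_nil] at h0; exact h0
    simp [hm, hdw, htw]
  · have hmne : line.dropWhile (· == 255) ≠ [] := by
      intro hnil
      exact hm ((idxAux_nil_iff line 0).mpr
        (by simpa using List.dropWhile_eq_nil_iff.mp hnil))
    have hsplit : line = line.takeWhile (· == 255) ++ line.dropWhile (· == 255) :=
      (List.takeWhile_append_dropWhile).symm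
    have htr : line.reverse.takeWhile (· == 255)
        = (line.dropWhile (· == 255)).reverse.takeWhile (· == 255) := by
      conv_lhs => rw [hsplit]
      rw [List.reverse_append]
      exact takeWhile_append_of_exists _ _ _
        ⟨(line.dropWhile (· == 255)).head hmne,
          by simp [List.mem_reverse, List.head_mem],
          List.head_dropWhile_not (· == 255) hmne⟩
    have hhead := idxAux_headD line 0 hm
    have hlast := idxAux_getLastD line 0 hm
    have hlen : line.length
        = (line.takeWhile (· == 255)).length + (line.dropWhile (· == 255)).length := by
      have h0 := congrArg List.length hsplit
      rwa [List.length_append] at h0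
    have htr'le : ((line.dropWhile (· == 255)).reverse.takeWhile (· == 255)).length
        ≤ (line.dropWhile (· == 255)).length := by
      have := (List.takeWhile_sublist (l := (line.dropWhile (· == 255)).reverse) (· == 255)).length_le
      simpa using this
    have h1 : (idxAux line 0).headD 0 = ((line.takeWhile (· == 255)).length : Int) := by
      rw [hhead]; ring
    have h2 : (line.length : Int) - 1 - (idxAux line 0).getLastD 0
        = (((line.dropWhile (· == 255)).reverse.takeWhile (· == 255)).length : Int) := by
      rw [hlast, htr]; ring
    have h3 : (line.length : Int)
          - (((line.dropWhile (· == 255)).reverse.takeWhile (· == 255)).length : Int)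
        = ((line.length - ((line.dropWhile (· == 255)).reverse.takeWhile (· == 255)).length : Nat) : Int) := by
      omega
    have hdrop : line.drop (line.takeWhile (· == 255)).length = line.dropWhile (· == 255) :=
      (dropWhile_eq_drop _ line).symm
    have hfirst : ((line.dropWhile (· == 255)).reverse.dropWhile (· == 255)).reverse
        = List.take
            ((line.length - ((line.dropWhile (· == 255)).reverse.takeWhile (· == 255)).length)
              - (line.takeWhile (· == 255)).length)
            (line.drop (line.takeWhile (· == 255)).length) := by
      rw [hdrop, dropWhile_eq_drop, List.reverse_drop]
      simp only [List.reverse_reverse, List.length_reverse]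
      congr 1
      omega
    simp only [hm, List.isEmpty_iff, h1, h2, h3]
    rw [PySem.List.slice_natCast]
    exact congrArg (fun x => (x, ((line.takeWhile (· == 255)).length : Int),
      (((line.dropWhile (· == 255)).reverse.takeWhile (· == 255)).length : Int))) hfirst

-- ===== VERDICT (by name: the statement is the Claim_ definition above) =====
theorem crop_white_spec : Claim_equal_crop_white := by
  intro line _
  exact crop_white_main line
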